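-- pv_equiv track=rewrite | github.com/a-brandon/practice | edabit/zygodrome.py | is_zygodrome
-- ===== SOURCE A (Python) =====
-- def is_zygodrome(n):
--     nums, count = set(str(n)), 0
--     for num in nums:
--         positions = [i for i, x in enumerate(str(n)) if x == num]
--         if len(positions) < 2:
--             return False
--         count += 1 if all(positions[i] + 1 == positions[i + 1]
--                           for i, _ in enumerate(positions[:-1])) else 0
--     return count == len(nums)
-- ===== SOURCE B (Python) =====
-- def is_zygodrome(n):
--     s = str(n)
--     runs = []
--     prev, cnt = None, 0
--     for ch in s:
--         if ch == prev:
--             cnt += 1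
--         else:
--             if prev is not None:
--                 runs.append((prev, cnt))
--             prev, cnt = ch, 1
--     if prev is not None:
--         runs.append((prev, cnt))
--     return all(k >= 2 for _, k in runs) and len(runs) == len(set(s))
-- ===== Notes on version B (the rewrite author's own statement) =====
-- stated objective: alternative
-- what changed: B replaces A's per-distinct-digit rescanning of str(n) (building an index list and a consecutiveness check for every distinct character, with a running counter) by a single left-to-right run-length-encoding pass, accepting iff every run has length at least two and the number of runs equals the number of distinct characters.
import Mathlib
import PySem

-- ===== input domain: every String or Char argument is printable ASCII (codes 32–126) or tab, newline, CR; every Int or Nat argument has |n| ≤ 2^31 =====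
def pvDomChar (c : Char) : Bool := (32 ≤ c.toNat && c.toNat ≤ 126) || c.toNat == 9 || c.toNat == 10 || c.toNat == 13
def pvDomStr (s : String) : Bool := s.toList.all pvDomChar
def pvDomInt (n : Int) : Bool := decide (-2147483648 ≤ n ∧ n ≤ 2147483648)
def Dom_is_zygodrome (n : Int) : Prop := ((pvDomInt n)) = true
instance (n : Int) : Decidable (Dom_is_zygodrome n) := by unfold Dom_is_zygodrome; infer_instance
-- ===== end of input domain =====

-- B replaces A's per-distinct-digit rescanning of str(n) by one left-to-right run-length-encoding
-- pass plus a distinct-count check (objective: alternative/simpler single-pass structure).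

-- ===== PORT A =====
-- positions = [i for i, x in enumerate(str(n)) if x == num]
def pvPositions (s : List Char) (num : Char) : List Int :=
  ((PySem.List.enumerate s).filter (fun p => p.2 == num)).map (fun p => p.1)

-- all(positions[i] + 1 == positions[i + 1] for i, _ in enumerate(positions[:-1]))
def pvAllConsec (positions : List Int) : Bool :=
  (PySem.List.enumerate (PySem.List.slice positions none (some (-1)))).all
    (fun p => PySem.List.pyGetD positions p.1 0 + 1 == PySem.List.pyGetD positions (p.1 + 1) 0)

-- the 'for num in nums' loop with its early 'return False' and the running count
def pvLoopA (s : List Char) : List Char → Int → Option Int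
  | [], count => some count
  | num :: rest, count =>
    let positions := pvPositions s num
    if positions.length < 2 then none
    else pvLoopA s rest (count + if pvAllConsec positions then 1 else 0)

def is_zygodrome (n : Int) : Bool :=
  let s := PySem.Int.toChars n
  let nums : PySem.Set Char := PySem.Set.ofList s
  match pvLoopA s nums 0 with
  | none => false
  | some count => count == (nums.length : Int)

-- ===== PORT B =====
-- one step of B's for-loop over the characters; state = (runs, prev, cnt)
def pvRunStep (st : List (Char × Int) × Option Char × Int) (ch : Char) :
    List (Char × Int) × Option Char × Int :=
  if some ch == st.2.1 then (st.1, st.2.1, st.2.2 + 1)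
  else
    match st.2.1 with
    | none => (st.1, some ch, 1)
    | some p => (st.1 ++ [(p, st.2.2)], some ch, 1)

-- the final 'if prev is not None: runs.append((prev, cnt))'
def pvFlush (st : List (Char × Int) × Option Char × Int) : List (Char × Int) :=
  match st.2.1 with
  | none => st.1
  | some p => st.1 ++ [(p, st.2.2)]

def is_zygodrome_alt (n : Int) : Bool :=
  let s := PySem.Int.toChars n
  let runs := pvFlush (s.foldl pvRunStep ([], none, 0))
  runs.all (fun r => 2 ≤ r.2) && (runs.length == (PySem.Set.ofList s : List Char).length)

-- ===== PRECONDITION & SPEC =====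
def Spec_is_zygodrome (n : Int) (out : Bool) : Prop := out = is_zygodrome_alt n
instance (n : Int) (out : Bool) : Decidable (Spec_is_zygodrome n out) := by unfold Spec_is_zygodrome; infer_instance

-- ===== CLAIM (what is proved, stated in full; the proofs are below) =====
def Claim_equal_is_zygodrome : Prop := ∀ (n : Int), Dom_is_zygodrome n → Spec_is_zygodrome n (is_zygodrome n)

-- ===== LEMMAS AND PROOFS =====

-- pairwise-successor check on a list, structural form of A's inner 'all'
def pvChain : List Int → Bool
  | a :: b :: t => (a + 1 == b) && pvChain (b :: t)
  | _ => true

theorem pvChain_iff : ∀ l : List Int,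
    pvChain l = true ↔ ∀ k : Nat, k < l.length - 1 → l.getD k 0 + 1 = l.getD (k + 1) 0
  | [] => by simp [pvChain]
  | [a] => by simp [pvChain]
  | a :: b :: t => by
    rw [show pvChain (a :: b :: t) = ((a + 1 == b) && pvChain (b :: t)) from rfl,
      Bool.and_eq_true, beq_iff_eq, pvChain_iff (b :: t)]
    constructor
    · rintro ⟨h1, h2⟩ k hk
      cases k with
      | zero => simpa using h1
      | succ k =>
        have := h2 k (by simp at hk ⊢; omega)
        simpa using this
    · intro h
      refine ⟨by simpa using h 0 (by simp), fun k hk => ?_⟩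
      have := h (k + 1) (by simp at hk ⊢; omega)
      simpa using this

theorem pvAllConsec_eq_chain (l : List Int) : pvAllConsec l = pvChain l := by
  rw [Bool.eq_iff_iff, pvChain_iff]
  unfold pvAllConsec
  rw [PySem.List.slice_to_neg_one, List.all_eq_true]
  have hcast : ∀ k : Nat, ((k : Int) + 1) = ((k + 1 : Nat) : Int) := by intro k; push_cast; ring
  constructor
  · intro h k hk
    have hk' : k < l.dropLast.length := by simp; omega
    have hm := h ((0 : Int) + (k : Int), l.dropLast[k]) (by
      rw [PySem.List.mem_enumerate_iff]; exact ⟨k, hk', rfl⟩)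
    simp only [zero_add, beq_iff_eq] at hm
    rwa [hcast k, PySem.List.pyGetD_natCast, PySem.List.pyGetD_natCast] at hm
  · intro h p hp
    rw [PySem.List.mem_enumerate_iff] at hp
    obtain ⟨k, hk, rfl⟩ := hp
    simp only [zero_add, beq_iff_eq]
    rw [hcast k, PySem.List.pyGetD_natCast, PySem.List.pyGetD_natCast]
    exact h k (by simp at hk; omega)

-- positions of c in s, with indices starting at i
def posFrom (c : Char) (s : List Char) (i : Int) : List Int :=
  ((PySem.List.enumerate s i).filter (fun p => p.2 == c)).map (fun p => p.1)

theorem pvPositions_eq_posFrom (s : List Char) (c : Char) : pvPositions s c = posFrom c s 0 := rfl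

theorem posFrom_nil (c : Char) (i : Int) : posFrom c [] i = [] := rfl

theorem posFrom_cons (c d : Char) (t : List Char) (i : Int) :
    posFrom c (d :: t) i = (if d = c then [i] else []) ++ posFrom c t (i + 1) := by
  simp only [posFrom, PySem.List.enumerate_cons, List.filter_cons]
  by_cases h : d = c <;> simp [h]

theorem posFrom_nil_iff (c : Char) : ∀ (t : List Char) (i : Int), posFrom c t i = [] ↔ c ∉ t
  | [], i => by simp [posFrom_nil]
  | d :: u, i => by
    rw [posFrom_cons]
    by_cases h : d = c
    · simp [h]
    · simp [h, posFrom_nil_iff c u (i + 1), Ne.symm h]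

theorem posFrom_head_ge (c : Char) : ∀ (t : List Char) (i a : Int) (r : List Int),
    posFrom c t i = a :: r → i ≤ a
  | [], i, a, r => by simp [posFrom_nil]
  | d :: u, i, a, r => by
    rw [posFrom_cons]
    by_cases h : d = c
    · rw [if_pos h, List.singleton_append]
      intro he
      injection he with h1 h2
      omega
    · rw [if_neg h, List.nil_append]
      intro he
      have := posFrom_head_ge c u (i + 1) a r he
      omega

theorem length_posFrom (c : Char) : ∀ (t : List Char) (i : Int),
    (posFrom c t i).length = t.count c
  | [], i => by simp [posFrom_nil]
  | d :: u, i => by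
    rw [posFrom_cons, List.count_cons]
    by_cases h : d = c <;>
      simp [h, length_posFrom c u (i + 1)]

-- B-side structural predicates: "occurrences of c form one block"
def pvInrun (c : Char) : List Char → Bool
  | [] => true
  | d :: t => if d = c then pvInrun c t else !(decide (c ∈ t))

def pvBlocky (c : Char) : List Char → Bool
  | [] => true
  | d :: t => if d = c then pvInrun c t else pvBlocky c t

theorem chain_cons_posFrom (c : Char) : ∀ (t : List Char) (i : Int),
    pvChain (i :: posFrom c t (i + 1)) = pvInrun c t
  | [], i => by simp [posFrom_nil, pvChain, pvInrun]
  | d :: u, i => by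
    rw [posFrom_cons]
    by_cases h : d = c
    · rw [if_pos h, List.singleton_append,
        show pvChain (i :: (i + 1) :: posFrom c u (i + 1 + 1)) =
          ((i + 1 == i + 1) && pvChain ((i + 1) :: posFrom c u (i + 1 + 1))) from rfl,
        chain_cons_posFrom c u (i + 1)]
      simp [pvInrun, h]
    · simp only [if_neg h, List.nil_append]
      rw [show pvInrun c (d :: u) = !(decide (c ∈ u)) from by simp [pvInrun, h]]
      by_cases hc : c ∈ u
      · obtain ⟨a, r, he⟩ : ∃ a r, posFrom c u (i + 1 + 1) = a :: r := by
          rcases hq : posFrom c u (i + 1 + 1) with _ | ⟨a, r⟩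
          · exact absurd ((posFrom_nil_iff c u _).mp hq) (by simpa using hc)
          · exact ⟨a, r, rfl⟩
        have hge := posFrom_head_ge c u (i + 1 + 1) a r he
        rw [he]
        rw [show pvChain (i :: a :: r) = ((i + 1 == a) && pvChain (a :: r)) from rfl]
        have : (i + 1 == a) = false := by simp; omega
        simp [this, hc]
      · rw [(posFrom_nil_iff c u _).mpr hc]
        simp [pvChain, hc]

theorem chain_posFrom (c : Char) : ∀ (t : List Char) (i : Int),
    pvChain (posFrom c t i) = pvBlocky c t
  | [], i => by simp [posFrom_nil, pvChain, pvBlocky]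
  | d :: u, i => by
    rw [posFrom_cons]
    by_cases h : d = c
    · rw [if_pos h, List.singleton_append, chain_cons_posFrom c u i]
      simp [pvBlocky, h]
    · simp only [if_neg h, List.nil_append]
      rw [chain_posFrom c u (i + 1)]
      simp [pvBlocky, h]

theorem len_pos (s : List Char) (c : Char) : (pvPositions s c).length = s.count c := by
  rw [pvPositions_eq_posFrom, length_posFrom]

theorem consec_eq_blocky (s : List Char) (c : Char) :
    pvAllConsec (pvPositions s c) = pvBlocky c s := by
  rw [pvAllConsec_eq_chain, pvPositions_eq_posFrom, chain_posFrom]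

-- ---- A characterised ----
theorem pvLoopA_eq (s : List Char) : ∀ (l : List Char) (count : Int),
    pvLoopA s l count =
      if ∀ c ∈ l, 2 ≤ (pvPositions s c).length then
        some (count + ((l.countP (fun c => pvAllConsec (pvPositions s c)) : Nat) : Int))
      else none
  | [], count => by simp [pvLoopA]
  | num :: rest, count => by
    rw [show pvLoopA s (num :: rest) count =
      (if (pvPositions s num).length < 2 then none
       else pvLoopA s rest (count + if pvAllConsec (pvPositions s num) then 1 else 0)) from rfl]
    by_cases h2 : 2 ≤ (pvPositions s num).length
    · rw [if_neg (by omega), pvLoopA_eq s rest]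
      by_cases hrest : ∀ c ∈ rest, 2 ≤ (pvPositions s c).length
      · have hall : ∀ c ∈ num :: rest, 2 ≤ (pvPositions s c).length := by
          intro c hc
          rcases List.mem_cons.mp hc with rfl | hc
          · exact h2
          · exact hrest c hc
        rw [if_pos hrest, if_pos hall, List.countP_cons]
        congr 1
        by_cases hcs : pvAllConsec (pvPositions s num) = true <;>
          simp [hcs] <;> push_cast <;> ring
      · have hno : ¬ ∀ c ∈ num :: rest, 2 ≤ (pvPositions s c).length := fun hall =>
          hrest fun c hc => hall c (List.mem_cons_of_mem _ hc)
        rw [if_neg hrest, if_neg hno]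
    · have hno : ¬ ∀ c ∈ num :: rest, 2 ≤ (pvPositions s c).length := fun hall =>
        h2 (hall num List.mem_cons_self)
      rw [if_pos (by omega), if_neg hno]

theorem A_iff (n : Int) :
    is_zygodrome n = true ↔
      ∀ c ∈ PySem.Int.toChars n,
        2 ≤ (PySem.Int.toChars n).count c ∧ pvBlocky c (PySem.Int.toChars n) = true := by
  have hs : is_zygodrome n =
      (match pvLoopA (PySem.Int.toChars n)
          (PySem.Set.ofList (PySem.Int.toChars n)) 0 with
       | none => false
       | some count =>
         count == (((PySem.Set.ofList (PySem.Int.toChars n) : List Char).length : Int))) := rfl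
  rw [hs, pvLoopA_eq]
  set s := PySem.Int.toChars n with hsdef
  set D : List Char := (PySem.Set.ofList s : List Char) with hD
  by_cases hall : ∀ c ∈ D, 2 ≤ (pvPositions s c).length
  · rw [if_pos hall]
    show ((0 + ((List.countP (fun c => pvAllConsec (pvPositions s c)) D : Nat) : Int)) ==
      ((D.length : Nat) : Int)) = true ↔ _
    rw [beq_iff_eq, zero_add]
    constructor
    · intro h c hc
      have hc' : c ∈ D := by rw [hD]; exact (PySem.Set.mem_ofList s c).mpr hc
      have h1 := hall c hc'
      rw [len_pos] at h1
      have hcp : List.countP (fun c => pvAllConsec (pvPositions s c)) D = D.length := by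
        exact_mod_cast h
      have hallc := List.countP_eq_length.mp hcp c hc'
      rw [consec_eq_blocky] at hallc
      exact ⟨h1, hallc⟩
    · intro h
      have hcp : List.countP (fun c => pvAllConsec (pvPositions s c)) D = D.length :=
        List.countP_eq_length.mpr (fun c hc => by
          rw [consec_eq_blocky]
          exact (h c ((PySem.Set.mem_ofList s c).mp (hD ▸ hc))).2)
      rw [hcp]
  · rw [if_neg hall]
    show (false = true) ↔ _
    simp only [Bool.false_eq_true, false_iff]
    intro h
    apply hall
    intro c hc
    rw [len_pos]
    exact (h c ((PySem.Set.mem_ofList s c).mp (hD ▸ hc))).1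

-- ---- B characterised ----
def pvRunsOf (s : List Char) : List (Char × Int) :=
  pvFlush (s.foldl pvRunStep ([], none, 0))

def dLen (s : List Char) : Nat := (PySem.Set.ofList s : List Char).length

theorem B_iff (n : Int) :
    is_zygodrome_alt n = true ↔
      ((∀ r ∈ pvRunsOf (PySem.Int.toChars n), 2 ≤ r.2) ∧
       (pvRunsOf (PySem.Int.toChars n)).length = dLen (PySem.Int.toChars n)) := by
  simp [is_zygodrome_alt, pvRunsOf, dLen, List.all_eq_true]

theorem flush_foldl_acc : ∀ (l : List Char) (rs : List (Char × Int)) (prev : Option Char) (cnt : Int),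
    pvFlush (l.foldl pvRunStep (rs, prev, cnt)) = rs ++ pvFlush (l.foldl pvRunStep ([], prev, cnt))
  | [], rs, prev, cnt => by cases prev <;> simp [pvFlush]
  | ch :: t, rs, prev, cnt => by
    simp only [List.foldl_cons]
    by_cases h : (some ch == prev) = true
    · rw [show pvRunStep (rs, prev, cnt) ch = (rs, prev, cnt + 1) from by simp [pvRunStep, h],
        show pvRunStep (([] : List (Char × Int)), prev, cnt) ch = ([], prev, cnt + 1) from by simp [pvRunStep, h]]
      exact flush_foldl_acc t rs prev (cnt + 1)
    · cases prev with
      | none =>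
        rw [show pvRunStep (rs, (none : Option Char), cnt) ch = (rs, some ch, 1) from by simp [pvRunStep, h],
          show pvRunStep (([] : List (Char × Int)), (none : Option Char), cnt) ch = ([], some ch, 1) from by simp [pvRunStep, h]]
        exact flush_foldl_acc t rs (some ch) 1
      | some p =>
        rw [show pvRunStep (rs, some p, cnt) ch = (rs ++ [(p, cnt)], some ch, 1) from by simp [pvRunStep, h],
          show pvRunStep (([] : List (Char × Int)), some p, cnt) ch = ([(p, cnt)], some ch, 1) from by simp [pvRunStep, h]]
        rw [flush_foldl_acc t (rs ++ [(p, cnt)]) (some ch) 1,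
          flush_foldl_acc t [(p, cnt)] (some ch) 1]
        simp

theorem foldl_replicate (c : Char) (t : List Char) (rs : List (Char × Int)) :
    ∀ (j : Nat) (cnt : Int),
    (List.replicate j c ++ t).foldl pvRunStep (rs, some c, cnt) = t.foldl pvRunStep (rs, some c, cnt + j)
  | 0, cnt => by simp
  | j + 1, cnt => by
    simp only [List.replicate_succ, List.cons_append, List.foldl_cons]
    rw [show pvRunStep (rs, some c, cnt) c = (rs, some c, cnt + 1) from by simp [pvRunStep]]
    rw [foldl_replicate c t rs j (cnt + 1)]
    have he : cnt + 1 + (j : Int) = cnt + ((j + 1 : Nat) : Int) := by push_cast; ring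
    rw [he]

theorem flush_foldl_ne (c : Char) (t : List Char) (k : Int) (hhead : t.head? ≠ some c) :
    pvFlush (t.foldl pvRunStep ([], some c, k)) = (c, k) :: pvRunsOf t := by
  cases t with
  | nil => simp [pvFlush, pvRunsOf]
  | cons d u =>
    have hdc : d ≠ c := by intro h; exact hhead (by simp [h])
    simp only [List.foldl_cons]
    rw [show pvRunStep (([] : List (Char × Int)), some c, k) d = ([(c, k)], some d, 1) from by
      simp [pvRunStep, hdc]]
    rw [flush_foldl_acc u [(c, k)] (some d) 1]
    rw [show pvRunsOf (d :: u) = pvFlush (u.foldl pvRunStep ([], some d, 1)) from by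
      simp only [pvRunsOf, List.foldl_cons]
      rw [show pvRunStep (([] : List (Char × Int)), (none : Option Char), 0) d = ([], some d, 1) from by
        simp [pvRunStep]]]
    simp

theorem runs_decomp (c : Char) (t : List Char) {k : Nat} (hk : 1 ≤ k) (hhead : t.head? ≠ some c) :
    pvRunsOf (List.replicate k c ++ t) = (c, (k : Int)) :: pvRunsOf t := by
  obtain ⟨j, rfl⟩ : ∃ j, k = j + 1 := ⟨k - 1, by omega⟩
  simp only [pvRunsOf, List.replicate_succ, List.cons_append, List.foldl_cons]
  rw [show pvRunStep (([] : List (Char × Int)), (none : Option Char), 0) c = ([], some c, 1) from by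
    simp [pvRunStep]]
  rw [foldl_replicate c t [] j 1]
  have := flush_foldl_ne c t (1 + (j : Int)) hhead
  rw [pvRunsOf] at this
  rw [this]
  have he : 1 + (j : Int) = ((j + 1 : Nat) : Int) := by push_cast; ring
  rw [he]

-- ---- blocky under the run decomposition ----
theorem inrun_repl (c : Char) (t : List Char) : ∀ j : Nat,
    pvInrun c (List.replicate j c ++ t) = pvInrun c t
  | 0 => by simp
  | j + 1 => by
    simp only [List.replicate_succ, List.cons_append]
    rw [show pvInrun c (c :: (List.replicate j c ++ t)) = pvInrun c (List.replicate j c ++ t) from by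
      simp [pvInrun]]
    exact inrun_repl c t j

theorem blocky_self_decomp (c : Char) (t : List Char) {k : Nat} (hk : 1 ≤ k)
    (hhead : t.head? ≠ some c) :
    pvBlocky c (List.replicate k c ++ t) = !(decide (c ∈ t)) := by
  obtain ⟨j, rfl⟩ : ∃ j, k = j + 1 := ⟨k - 1, by omega⟩
  simp only [List.replicate_succ, List.cons_append]
  rw [show pvBlocky c (c :: (List.replicate j c ++ t)) = pvInrun c (List.replicate j c ++ t) from by
    simp [pvBlocky]]
  rw [inrun_repl]
  cases t with
  | nil => simp [pvInrun]
  | cons d u =>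
    have hdc : d ≠ c := by intro h; exact hhead (by simp [h])
    rw [show pvInrun c (d :: u) = !(decide (c ∈ u)) from by simp [pvInrun, hdc]]
    simp [Ne.symm hdc]

theorem blocky_other (c x : Char) (t : List Char) (hx : x ≠ c) : ∀ j : Nat,
    pvBlocky x (List.replicate j c ++ t) = pvBlocky x t
  | 0 => by simp
  | j + 1 => by
    simp only [List.replicate_succ, List.cons_append]
    rw [show pvBlocky x (c :: (List.replicate j c ++ t)) = pvBlocky x (List.replicate j c ++ t) from by
      simp [pvBlocky, Ne.symm hx]]
    exact blocky_other c x t hx j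

-- ---- distinct count ----
theorem dLen_eq_card (s : List Char) : dLen s = s.toFinset.card := by
  rw [dLen, ← List.toFinset_card_of_nodup (PySem.Set.nodup_ofList s)]
  congr 1
  ext x
  simp [PySem.Set.mem_ofList]

theorem dLen_decomp (c : Char) (t : List Char) {k : Nat} (hk : 1 ≤ k) :
    dLen (List.replicate k c ++ t) = if c ∈ t then dLen t else dLen t + 1 := by
  rw [dLen_eq_card, dLen_eq_card]
  have : (List.replicate k c ++ t).toFinset = insert c t.toFinset := by
    ext x
    simp [List.mem_replicate]
    constructor
    · rintro (⟨-, rfl⟩ | hx)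
      · exact Or.inl rfl
      · exact Or.inr hx
    · rintro (rfl | hx)
      · exact Or.inl ⟨by omega, rfl⟩
      · exact Or.inr hx
  rw [this]
  by_cases hct : c ∈ t
  · rw [if_pos hct, Finset.card_insert_of_mem (by simpa using hct)]
  · rw [if_neg hct, Finset.card_insert_of_notMem (by simpa using hct)]

-- ---- run induction principle ----
theorem dropWhile_head_not {α : Type} (p : α → Bool) :
    ∀ (l : List α) (a : α), (List.dropWhile p l).head? = some a → p a = false
  | [], a => by simp
  | b :: u, a => by
    rw [List.dropWhile_cons]
    by_cases h : p b = true
    · rw [if_pos h]; exact dropWhile_head_not p u a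
    · rw [if_neg h]
      intro he
      simp at he
      subst he
      simpa using h

theorem run_induction (P : List Char → Prop) (h0 : P [])
    (h1 : ∀ (k : Nat) (c : Char) (t : List Char), 1 ≤ k → t.head? ≠ some c →
      P t → P (List.replicate k c ++ t)) :
    ∀ s, P s := by
  have key : ∀ (m : Nat) (s : List Char), s.length ≤ m → P s := by
    intro m
    induction m with
    | zero =>
      intro s hs
      rw [List.length_eq_zero_iff.mp (Nat.le_zero.mp hs)]
      exact h0
    | succ m ih =>
      intro s hs
      cases s with
      | nil => exact h0
      | cons c t0 =>
        have htk : t0.takeWhile (fun x => x == c) =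
            List.replicate (t0.takeWhile (fun x => x == c)).length c :=
          List.eq_replicate_of_mem (fun b hb => by
            have := List.mem_takeWhile_imp hb
            simpa using this)
        have hs' : c :: t0 =
            List.replicate ((t0.takeWhile (fun x => x == c)).length + 1) c ++
              t0.dropWhile (fun x => x == c) := by
          rw [List.replicate_succ, List.cons_append, ← htk, List.takeWhile_append_dropWhile]
        have hhead : (t0.dropWhile (fun x => x == c)).head? ≠ some c := by
          intro he
          have := dropWhile_head_not (fun x => x == c) t0 c he
          simpa using this
        have hlen : (t0.dropWhile (fun x => x == c)).length ≤ m := by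
          have := List.length_dropWhile_le (fun x => x == c) t0
          simp at hs
          omega
        rw [hs']
        exact h1 _ c _ (by omega) hhead (ih _ hlen)
  intro s
  exact key s.length s le_rfl

theorem dLen_le_runs : ∀ s : List Char, dLen s ≤ (pvRunsOf s).length := by
  refine run_induction _ (by simp [dLen, pvRunsOf, pvFlush]) ?_
  intro k c t hk hhead ih
  rw [runs_decomp c t hk hhead, dLen_decomp c t hk]
  by_cases hct : c ∈ t <;> simp [hct] <;> omega

-- ---- the crux: A's per-character conditions ⇔ B's run conditions ----
theorem key_iff : ∀ s : List Char,
    (∀ c ∈ s, 2 ≤ s.count c ∧ pvBlocky c s = true) ↔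
      ((∀ r ∈ pvRunsOf s, 2 ≤ r.2) ∧ (pvRunsOf s).length = dLen s) := by
  refine run_induction _ (by simp [pvRunsOf, pvFlush, dLen]) ?_
  intro k c t hk hhead ih
  have hmem : ∀ x, x ∈ List.replicate k c ++ t ↔ x = c ∨ x ∈ t := by
    intro x
    simp [List.mem_replicate]
    constructor
    · rintro (⟨-, rfl⟩ | hx)
      · exact Or.inl rfl
      · exact Or.inr hx
    · rintro (rfl | hx)
      · exact Or.inl ⟨by omega, rfl⟩
      · exact Or.inr hx
  rw [runs_decomp c t hk hhead]
  by_cases hct : c ∈ t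
  · constructor
    · intro h
      exfalso
      have hb := (h c ((hmem c).mpr (Or.inl rfl))).2
      rw [blocky_self_decomp c t hk hhead] at hb
      simp [hct] at hb
    · rintro ⟨-, hlen⟩
      exfalso
      rw [dLen_decomp c t hk, if_pos hct] at hlen
      have := dLen_le_runs t
      simp at hlen
      omega
  · have hcnt_c : (List.replicate k c ++ t).count c = k := by
      rw [List.count_append, List.count_replicate, List.count_eq_zero.mpr hct]
      simp
    have hcnt_x : ∀ x ∈ t, (List.replicate k c ++ t).count x = t.count x := by
      intro x hx
      have hxc : x ≠ c := fun h => hct (h ▸ hx)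
      rw [List.count_append, List.count_replicate, if_neg (by simpa using Ne.symm hxc)]
      simp
    have hb_c : pvBlocky c (List.replicate k c ++ t) = true := by
      rw [blocky_self_decomp c t hk hhead]
      simp [hct]
    rw [dLen_decomp c t hk, if_neg hct]
    constructor
    · intro h
      have hk2 : 2 ≤ k := by
        have := (h c ((hmem c).mpr (Or.inl rfl))).1
        rwa [hcnt_c] at this
      have ht : ∀ x ∈ t, 2 ≤ t.count x ∧ pvBlocky x t = true := by
        intro x hx
        have hxc : x ≠ c := fun h' => hct (h' ▸ hx)
        have := h x ((hmem x).mpr (Or.inr hx))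
        rw [hcnt_x x hx, blocky_other c x t hxc] at this
        exact this
      obtain ⟨hr, hl⟩ := ih.mp ht
      refine ⟨?_, by simp [hl]⟩
      intro r hr'
      rcases List.mem_cons.mp hr' with rfl | hr'
      · show (2 : Int) ≤ (k : Int)
        exact_mod_cast hk2
      · exact hr r hr'
    · rintro ⟨hr, hl⟩
      have hk2 : 2 ≤ k := by
        have h' : (2 : Int) ≤ (k : Int) := hr (c, (k : Int)) List.mem_cons_self
        exact_mod_cast h'
      have ht := ih.mpr ⟨fun r hr' => hr r (List.mem_cons_of_mem _ hr'), by simpa using hl⟩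
      intro x hx
      rcases (hmem x).mp hx with rfl | hx'
      · exact ⟨by rwa [hcnt_c], hb_c⟩
      · have hxc : x ≠ c := fun h' => hct (h' ▸ hx')
        obtain ⟨h2, hb⟩ := ht x hx'
        exact ⟨by rwa [hcnt_x x hx'], by rwa [blocky_other c x t hxc]⟩

theorem main_eq (n : Int) : is_zygodrome n = is_zygodrome_alt n := by
  rw [Bool.eq_iff_iff, A_iff, B_iff]
  exact key_iff (PySem.Int.toChars n)

-- ===== VERDICT (by name: the statement is the Claim_ definition above) =====
theorem is_zygodrome_spec : Claim_equal_is_zygodrome := by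
  intro n _
  unfold Spec_is_zygodrome
  exact main_eq n
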